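-- pv_equiv track=rewrite | github.com/dreipfundflachs/Project-Euler-Solutions | project_euler.py | composite_sieve
-- ===== SOURCE A (Python) =====
-- def composite_sieve(N: int) -> list[int]:
--     """ Returns a list of all composite numbers <= N, computed using
--     Eratosthenes' sieve """
--     flags = [True] * (N + 1)
--     flags[0] = False
--     flags[1] = False
--     for (k, is_prime) in enumerate(flags):
--         if is_prime:
--             for multiple in range(2 * k, N + 1, k):
--                 flags[multiple] = False
--     composite = [n for n in range(N + 1) if n > 1 and flags[n] is False]
--     return composite
-- ===== SOURCE B (Python) =====
-- def composite_sieve(N: int) -> list[int]: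
--     """Returns a list of all composite numbers <= N, by trial division:
--     n is composite iff some d with 2 <= d, d*d <= n divides n."""
--     def has_factor(n: int) -> bool:
--         d = 2
--         while d * d <= n:
--             if n % d == 0:
--                 return True
--             d += 1
--         return False
--     return [n for n in range(2, N + 1) if has_factor(n)]
-- ===== Notes on version B (the rewrite author's own statement) =====
-- stated objective: alternative
-- what changed: Replaces the Eratosthenes sieve over a boolean flag array with per-number trial division (smallest-divisor search up to sqrt(n)); Pre_ excludes N <= 0, where A raises IndexError on the flag-array setup while B would return [].
import Mathlib
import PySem

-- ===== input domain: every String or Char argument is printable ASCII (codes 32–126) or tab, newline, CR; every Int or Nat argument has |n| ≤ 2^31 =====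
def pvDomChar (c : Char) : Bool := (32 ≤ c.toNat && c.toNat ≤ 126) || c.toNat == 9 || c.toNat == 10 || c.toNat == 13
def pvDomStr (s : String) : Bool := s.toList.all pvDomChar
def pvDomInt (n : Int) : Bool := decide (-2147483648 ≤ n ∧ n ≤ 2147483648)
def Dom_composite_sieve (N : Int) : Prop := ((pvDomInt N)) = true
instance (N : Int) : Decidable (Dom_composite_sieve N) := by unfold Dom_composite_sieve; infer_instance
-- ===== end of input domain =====

-- B replaces the Eratosthenes sieve by per-number trial division (alternative algorithm,
-- similar cost at these sizes); Pre_ excludes N ≤ 0, where A raises IndexError.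


-- ===== PORT A =====
-- flags = [True]*(N+1); flags[0] = False; flags[1] = False  (assignments in range under Pre_;
-- Array.setIfInBounds is a no-op out of range where Python raises — those N are outside Pre_).
-- 'for (k, is_prime) in enumerate(flags)' reads the LIVE list: ported as a fold over the
-- indices reading the current array, exact because iteration k only mutates indices ≥ 2k > k.
-- 'flags[multiple] = False': multiple ≥ 2k ≥ 0, so .toNat is exact here.
def composite_sieve (N : Int) : List Int :=
  let flags0 : Array Bool := ((Array.replicate (N + 1).toNat true).setIfInBounds 0 false).setIfInBounds 1 false
  let flags : Array Bool := (List.range flags0.size).foldl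
    (fun fl k =>
      if fl.getD k false then
        (PySem.List.pyRange (2 * (k : Int)) (N + 1) (k : Int)).foldl
          (fun fl2 m => fl2.setIfInBounds m.toNat false) fl
      else fl) flags0
  (PySem.List.pyRange 0 (N + 1)).filter
    (fun n => decide (1 < n) && (flags.getD n.toNat true == false))

-- ===== PORT B =====
-- while d * d <= n: if n % d == 0: return True; d += 1   (then return False)
-- The fuel argument only makes the while-loop total: (n+1).toNat iterations always
-- suffice to reach d * d > n, so it never alters the computed value.
def hasFactorAux (fuel : Nat) (n : Int) (d : Int) : Bool :=
  match fuel with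
  | 0 => false
  | fuel + 1 =>
    if d * d ≤ n then
      if PySem.Int.mod n d == 0 then true else hasFactorAux fuel n (d + 1)
    else false

def composite_sieve_alt (N : Int) : List Int :=
  (PySem.List.pyRange 2 (N + 1)).filter (fun n => hasFactorAux (n + 1).toNat n 2)

-- ===== PRECONDITION & SPEC =====
-- Pre_ excludes N ≤ 0, where A raises IndexError on the 'flags[0] = False' / 'flags[1] = False' setup.
def Pre_composite_sieve (N : Int) : Prop := 1 ≤ N
instance (N : Int) : Decidable (Pre_composite_sieve N) := by unfold Pre_composite_sieve; infer_instance
def pvWitness_composite_sieve : Int := (12)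

def Spec_composite_sieve (N : Int) (out : List Int) : Prop := out = composite_sieve_alt N
instance (N : Int) (out : List Int) : Decidable (Spec_composite_sieve N out) := by unfold Spec_composite_sieve; infer_instance

-- ===== CLAIM (what is proved, stated in full; the proofs are below) =====
def Claim_equal_composite_sieve : Prop := ∀ (N : Int), Dom_composite_sieve N → Pre_composite_sieve N → Spec_composite_sieve N (composite_sieve N)

-- ===== LEMMAS AND PROOFS =====

-- B side: hasFactorAux n d finds a divisor e ≥ d with e*e ≤ n.
theorem hasFactorAux_iff (fuel : Nat) (n d : Int) :
    0 ≤ d → (n + 2 - d).toNat ≤ fuel →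
    (hasFactorAux fuel n d = true ↔ ∃ e : Int, d ≤ e ∧ e * e ≤ n ∧ e ∣ n) := by
  induction fuel generalizing d with
  | zero =>
    intro hd hfuel
    have hdn : n + 2 ≤ d := by omega
    simp only [hasFactorAux, Bool.false_eq_true, false_iff]
    rintro ⟨e, he, h1, h2⟩
    nlinarith [sq_nonneg e]
  | succ fuel ih =>
    intro hd hfuel
    by_cases h : d * d ≤ n
    · by_cases hm : PySem.Int.mod n d == 0
      · simp only [hasFactorAux, if_pos h, if_pos hm]
        have hdvd : d ∣ n := (PySem.Int.mod_eq_zero_iff_dvd n d).mp (by simpa using hm)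
        exact ⟨fun _ => ⟨d, le_refl d, h, hdvd⟩, fun _ => trivial⟩
      · simp only [hasFactorAux, if_pos h, if_neg hm]
        rw [ih (d + 1) (by omega) (by omega)]
        constructor
        · rintro ⟨e, he, h1, h2⟩
          exact ⟨e, by omega, h1, h2⟩
        · rintro ⟨e, he, h1, h2⟩
          rcases eq_or_lt_of_le he with rfl | hlt
          · exact absurd ((PySem.Int.mod_eq_zero_iff_dvd n d).mpr h2) (by simpa using hm)
          · exact ⟨e, by omega, h1, h2⟩
    · simp only [hasFactorAux, if_neg h, Bool.false_eq_true, false_iff]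
      rintro ⟨e, he, h1, h2⟩
      have hsq : d * d ≤ e * e := by nlinarith
      exact h (le_trans hsq h1)

-- n ≥ 2 is composite iff it has a divisor in [2, n) iff it has one with square ≤ n.
theorem hasFactor_iff_composite (n : Int) (hn : 2 ≤ n) :
    hasFactorAux (n + 1).toNat n 2 = true ↔ ∃ d : Int, 2 ≤ d ∧ d < n ∧ d ∣ n := by
  rw [hasFactorAux_iff (n + 1).toNat n 2 (by norm_num) (by omega)]
  constructor
  · rintro ⟨e, he, h1, h2⟩
    exact ⟨e, he, by nlinarith, h2⟩
  · rintro ⟨d, hd2, hdn, hdvd⟩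
    obtain ⟨c, hc⟩ := hdvd
    by_cases h : d * d ≤ n
    · exact ⟨d, hd2, h, ⟨c, hc⟩⟩
    · have h' : n < d * d := not_le.mp h
      have hd0 : (0 : Int) < d := by omega
      clear h
      have hc1 : 1 ≤ c := by nlinarith
      have hcd : c < d := by nlinarith
      have hc2 : 2 ≤ c := by nlinarith
      exact ⟨c, hc2, by nlinarith, ⟨d, by rw [hc]; ring⟩⟩

-- Array.getD, seen through getElem?.
theorem arrayGetD_eq (a : Array Bool) (j : Nat) (b : Bool) : a.getD j b = a[j]?.getD b := by
  unfold Array.getD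
  split
  · next h => rw [Array.getElem?_eq_getElem h]; rfl
  · next h => rw [Array.getElem?_eq_none (by omega)]; rfl

theorem arrayGetD_eq_getElem (a : Array Bool) (j : Nat) (b : Bool) (h : j < a.size) :
    a.getD j b = a[j] := by
  unfold Array.getD
  rw [dif_pos h]
  rfl

-- A side: the mark-multiples inner fold, pointwise.
theorem set_fold_getD (ms : List Int) (hms : ∀ m ∈ ms, 0 ≤ m) (fl : Array Bool) (j : Nat) :
    (ms.foldl (fun fl2 m => fl2.setIfInBounds m.toNat false) fl).getD j false
      = if (j : Int) ∈ ms then false else fl.getD j false := by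
  induction ms generalizing fl with
  | nil => simp
  | cons m rest ih =>
    have hm : 0 ≤ m := hms m List.mem_cons_self
    rw [List.foldl_cons, ih (fun x hx => hms x (List.mem_cons_of_mem _ hx))]
    by_cases hr : (j : Int) ∈ rest
    · simp [hr]
    · by_cases hj : (j : Int) = m
      · have hmt : m.toNat = j := by omega
        subst hmt
        rw [if_neg hr, if_pos (by simp [hj])]
        rw [arrayGetD_eq, Array.getElem?_setIfInBounds]
        split_ifs <;> simp_all
      · have hne : m.toNat ≠ j := by omega
        rw [if_neg hr, if_neg (by simp [hj, hr])]
        rw [arrayGetD_eq, Array.getElem?_setIfInBounds, if_neg (fun hh => hne hh),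
          ← arrayGetD_eq]

theorem set_fold_size (ms : List Int) (fl : Array Bool) :
    (ms.foldl (fun fl2 m => fl2.setIfInBounds m.toNat false) fl).size = fl.size := by
  induction ms generalizing fl with
  | nil => rfl
  | cons m rest ih => rw [List.foldl_cons, ih, Array.size_setIfInBounds]

-- The false-entries after the first i iterations of A's outer loop.
def PFalse (i j : Nat) : Prop := j < 2 ∨ ∃ d : Nat, 2 ≤ d ∧ d < i ∧ d ∣ j ∧ d < j

theorem sieve_invariant (N : Int) (hN : 1 ≤ N) (i : Nat) :
    i ≤ (N + 1).toNat →
    ((((List.range i).foldl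
      (fun fl k =>
        if fl.getD k false then
          (PySem.List.pyRange (2 * (k : Int)) (N + 1) (k : Int)).foldl
            (fun fl2 m => fl2.setIfInBounds m.toNat false) fl
        else fl)
      (((Array.replicate (N + 1).toNat true).setIfInBounds 0 false).setIfInBounds 1 false)).size = (N + 1).toNat)
    ∧ ∀ j < (N + 1).toNat,
      ((((List.range i).foldl
        (fun fl k =>
          if fl.getD k false then
            (PySem.List.pyRange (2 * (k : Int)) (N + 1) (k : Int)).foldl
              (fun fl2 m => fl2.setIfInBounds m.toNat false) fl
          else fl)
        (((Array.replicate (N + 1).toNat true).setIfInBounds 0 false).setIfInBounds 1 false)).getD j false = false)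
        ↔ PFalse i j)) := by
  induction i with
  | zero =>
    intro _
    refine ⟨by simp, fun j hj => ?_⟩
    simp only [List.range_zero, List.foldl_nil]
    have h2 : 2 ≤ (N + 1).toNat := by omega
    have hpf : PFalse 0 j ↔ j < 2 := by
      unfold PFalse
      constructor
      · rintro (h | ⟨d, _, hd0, _⟩)
        · exact h
        · omega
      · exact Or.inl
    rw [arrayGetD_eq, Array.getElem?_setIfInBounds, Array.getElem?_setIfInBounds, hpf]
    simp only [Array.size_setIfInBounds, Array.size_replicate, Array.getElem?_replicate]
    split_ifs <;> simp_all <;> omega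
  | succ i ih =>
    intro hi
    have hii : i < (N + 1).toNat := by omega
    obtain ⟨hlen, hinv⟩ := ih (by omega)
    rw [List.range_succ, List.foldl_append, List.foldl_cons, List.foldl_nil]
    set fl : Array Bool := (List.range i).foldl
      (fun fl k =>
        if fl.getD k false then
          (PySem.List.pyRange (2 * (k : Int)) (N + 1) (k : Int)).foldl
            (fun fl2 m => fl2.setIfInBounds m.toNat false) fl
        else fl)
      (((Array.replicate (N + 1).toNat true).setIfInBounds 0 false).setIfInBounds 1 false) with hfldef
    by_cases hp : fl.getD i false = true
    · have hnp : ¬ PFalse i i := by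
        intro hpf
        have h2 := (hinv i hii).mpr hpf
        rw [h2] at hp
        exact Bool.noConfusion hp
      have hi2 : 2 ≤ i := by
        by_contra hcon
        exact hnp (Or.inl (by omega))
      have hstep : (0 : Int) < (i : Int) := by omega
      rw [if_pos hp]
      have hnn : ∀ m ∈ PySem.List.pyRange (2 * (i : Int)) (N + 1) (i : Int), 0 ≤ m := by
        intro m hm
        have := (PySem.List.mem_pyRange_iff_of_pos hstep m).mp hm
        omega
      refine ⟨by rw [set_fold_size, hlen], fun j hj => ?_⟩
      rw [set_fold_getD _ hnn fl j]
      have hmemiff : ((j : Int) ∈ PySem.List.pyRange (2 * (i : Int)) (N + 1) (i : Int))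
          ↔ (i ∣ j ∧ i < j) := by
        rw [PySem.List.mem_pyRange_iff_of_pos hstep]
        constructor
        · rintro ⟨hlo, hhi, hdv⟩
          have hdvd : (i : Int) ∣ (j : Int) := by
            have heq : (j : Int) = ((j : Int) - 2 * i) + i * 2 := by ring
            rw [heq]
            exact dvd_add hdv ⟨2, rfl⟩
          exact ⟨Int.natCast_dvd_natCast.mp hdvd, by omega⟩
        · rintro ⟨hdv, hlt⟩
          obtain ⟨t, ht⟩ := hdv
          have ht2 : 2 ≤ t := by
            by_contra hcon
            have hle : i * t ≤ i := by
              calc i * t ≤ i * 1 := Nat.mul_le_mul_left i (by omega)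
                _ = i := by ring
            omega
          have h2i : 2 * i ≤ j := by
            have : 2 * i ≤ i * t := by
              calc 2 * i = i * 2 := by ring
                _ ≤ i * t := Nat.mul_le_mul_left i ht2
            omega
          refine ⟨by omega, by omega, ?_⟩
          have hdvd2 : (i : Int) ∣ (j : Int) := Int.natCast_dvd_natCast.mpr ⟨t, ht⟩
          exact dvd_sub hdvd2 ⟨2, by ring⟩
      by_cases hmem : (j : Int) ∈ PySem.List.pyRange (2 * (i : Int)) (N + 1) (i : Int)
      · rw [if_pos hmem]
        obtain ⟨hdv, hlt⟩ := hmemiff.mp hmem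
        exact ⟨fun _ => Or.inr ⟨i, hi2, by omega, hdv, hlt⟩, fun _ => rfl⟩
      · rw [if_neg hmem, hinv j hj]
        unfold PFalse
        constructor
        · rintro (h | ⟨d, hd2, hdi, hddvd, hdj⟩)
          · exact Or.inl h
          · exact Or.inr ⟨d, hd2, by omega, hddvd, hdj⟩
        · rintro (h | ⟨d, hd2, hdi, hddvd, hdj⟩)
          · exact Or.inl h
          · rcases Nat.lt_succ_iff_lt_or_eq.mp hdi with hlt | rfl
            · exact Or.inr ⟨d, hd2, hlt, hddvd, hdj⟩
            · exact absurd (hmemiff.mpr ⟨hddvd, hdj⟩) hmem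
    · have hp' : fl.getD i false = false := by
        cases hb : fl.getD i false
        · rfl
        · exact absurd hb hp
      have hpf : PFalse i i := (hinv i hii).mp hp'
      rw [hp']
      simp only [Bool.false_eq_true, if_false]
      refine ⟨hlen, fun j hj => ?_⟩
      rw [hinv j hj]
      unfold PFalse
      constructor
      · rintro (h | ⟨d, hd2, hdi, hddvd, hdj⟩)
        · exact Or.inl h
        · exact Or.inr ⟨d, hd2, by omega, hddvd, hdj⟩
      · rintro (h | ⟨d, hd2, hdi, hddvd, hdj⟩)
        · exact Or.inl h
        · rcases Nat.lt_succ_iff_lt_or_eq.mp hdi with hlt | rfl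
          · exact Or.inr ⟨d, hd2, hlt, hddvd, hdj⟩
          · rcases hpf with hlt2 | ⟨e, he2, hei, heddvd, _⟩
            · omega
            · exact Or.inr ⟨e, he2, hei, dvd_trans heddvd hddvd, by omega⟩

-- ===== VERDICT (by name: the statement is the Claim_ definition above) =====
theorem composite_sieve_spec : Claim_equal_composite_sieve := by
  intro N _ hPre
  have hN : (1 : Int) ≤ N := hPre
  unfold Spec_composite_sieve composite_sieve composite_sieve_alt
  dsimp only
  have hlen0 : (((Array.replicate (N + 1).toNat true).setIfInBounds 0 false).setIfInBounds 1 false).size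
      = (N + 1).toNat := by simp
  rw [hlen0]
  obtain ⟨hlen, hinv⟩ := sieve_invariant N hN (N + 1).toNat (le_refl _)
  set fl : Array Bool := (List.range (N + 1).toNat).foldl
    (fun fl k =>
      if fl.getD k false then
        (PySem.List.pyRange (2 * (k : Int)) (N + 1) (k : Int)).foldl
          (fun fl2 m => fl2.setIfInBounds m.toNat false) fl
      else fl)
    (((Array.replicate (N + 1).toNat true).setIfInBounds 0 false).setIfInBounds 1 false) with hfldef
  rw [PySem.List.pyRange_one_cons (show (0 : Int) < N + 1 by omega)]
  rw [show (0 : Int) + 1 = 1 by norm_num]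
  rw [PySem.List.pyRange_one_cons (show (1 : Int) < N + 1 by omega)]
  rw [show (1 : Int) + 1 = 2 by norm_num]
  rw [List.filter_cons, List.filter_cons]
  simp only [show (decide ((1 : Int) < 0)) = false from by norm_num,
    show (decide ((1 : Int) < 1)) = false from by norm_num,
    Bool.false_and, Bool.false_eq_true, if_false]
  apply List.filter_congr
  intro m hm
  obtain ⟨hm2, hmN⟩ := PySem.List.mem_pyRange_one.mp hm
  have hjdef : ((m.toNat : Int)) = m := Int.toNat_of_nonneg (by omega)
  set j := m.toNat with hj
  have hjlt : j < (N + 1).toNat := by omega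
  have hj2 : 2 ≤ j := by omega
  have hAl : (decide (1 < m) && (fl.getD j true == false)) = (fl.getD j false == false) := by
    rw [decide_eq_true (show (1 : Int) < m by omega), Bool.true_and,
      arrayGetD_eq_getElem _ _ _ (by rw [hlen]; exact hjlt),
      arrayGetD_eq_getElem _ _ _ (by rw [hlen]; exact hjlt)]
  rw [hAl]
  have hA : ((fl.getD j false == false) = true) ↔ PFalse (N + 1).toNat j := by
    rw [beq_iff_eq]
    exact hinv j hjlt
  have hB := hasFactor_iff_composite m hm2
  have hbridge : PFalse (N + 1).toNat j ↔ ∃ d : Int, 2 ≤ d ∧ d < m ∧ d ∣ m := by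
    unfold PFalse
    constructor
    · rintro (hlt | ⟨d, hd2, _, hdvd, hdj⟩)
      · exact absurd hlt (by omega)
      · refine ⟨(d : Int), by omega, by omega, ?_⟩
        rw [← hjdef]
        exact_mod_cast hdvd
    · rintro ⟨d, hd2, hdm, hdvd⟩
      refine Or.inr ⟨d.toNat, by omega, by omega, ?_, by omega⟩
      refine Int.natCast_dvd_natCast.mp ?_
      rw [show ((d.toNat : Int)) = d by omega, hj, hjdef]
      exact hdvd
  by_cases hc : ∃ d : Int, 2 ≤ d ∧ d < m ∧ d ∣ m
  · rw [hA.mpr (hbridge.mpr hc), hB.mpr hc]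
  · have h1 : (fl.getD j false == false) = false := by
      cases hb : (fl.getD j false == false)
      · rfl
      · exact absurd (hbridge.mp (hA.mp hb)) hc
    have h2 : hasFactorAux (m + 1).toNat m 2 = false := by
      cases hb : hasFactorAux (m + 1).toNat m 2
      · rfl
      · exact absurd (hB.mp hb) hc
    rw [h1, h2]
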